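-- pv_equiv track=rewrite | github.com/kobbikobb/adventofcode25 | day09/part2.py | find_biggest_rectangle
-- ===== SOURCE A (Python) =====
-- def size_between_corners(corner_a: tuple[int, int], corner_b: tuple[int, int]) -> int:
--     """Calculates the size between two corners"""
--
--     size_x = abs(corner_a[0] - corner_b[0]) + 1
--     size_y = abs(corner_a[1] - corner_b[1]) + 1
--
--     return size_x * size_y
--
-- def is_full(
--     corner_a: tuple[int, int],
--     corner_b: tuple[int, int],
--     covered_ranges: dict[int, tuple[int, int]],
-- ) -> bool:
--     """check if all cells in rectangle (except corners) are covered using ranges"""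
--     rect_x_min = min(corner_a[0], corner_b[0])
--     rect_x_max = max(corner_a[0], corner_b[0])
--     rect_y_min = min(corner_a[1], corner_b[1])
--     rect_y_max = max(corner_a[1], corner_b[1])
--
--     for y in range(rect_y_min, rect_y_max):
--         # check if this row exists in covered ranges
--         if y not in covered_ranges:
--             return False
--
--         covered_x_min, covered_x_max = covered_ranges[y]
--
--         # check if the covered range fully contains the rectangle's x-range for this row
--         if covered_x_min > rect_x_min or covered_x_max < rect_x_max:
--             return False
--
--     return True
--
-- def find_biggest_rectangle(
--     corners: list[tuple[int, int]], covered_ranges: dict[int, tuple[int, int]]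
-- ) -> int:
--     """Finds the biggest rectangle that is fully covered"""
--     result = 0
--
--     for corner_a in corners:
--         for corner_b in corners:
--             if corner_a == corner_b:
--                 continue
--
--             if not is_full(corner_a, corner_b, covered_ranges):
--                 continue
--
--             size = size_between_corners(corner_a, corner_b)
--             result = max(result, size)
--
--     return result
-- ===== SOURCE B (Python) =====
-- def find_biggest_rectangle(corners, covered_ranges):
--     """Finds the biggest rectangle that is fully covered.
--
--     Sorts the covered rows once; for each unordered corner pair, binary
--     search locates the rows inside the pair's y-span and only those rows
--     are checked: the pair is fully covered iff that row block is as long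
--     as the pair's y-span and every row in it covers the pair's x-range -
--     instead of probing the dict at every integer y of every ordered pair."""
--     rows = sorted(covered_ranges.items(), key=lambda t: t[0])
--     ys = [t[0] for t in rows]
--     n = len(ys)
--
--     def left_pos(x):
--         lo, hi = 0, n
--         while lo < hi:
--             mid = (lo + hi) // 2
--             if ys[mid] < x:
--                 lo = mid + 1
--             else:
--                 hi = mid
--         return lo
--
--     best = 0
--     for i, a in enumerate(corners):
--         for b in corners[i + 1:]:
--             if a == b:
--                 continue
--             x_min = min(a[0], b[0])
--             x_max = max(a[0], b[0])
--             y_min = min(a[1], b[1])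
--             y_max = max(a[1], b[1])
--             lo_i = left_pos(y_min)
--             hi_i = left_pos(y_max)
--             if hi_i - lo_i == y_max - y_min and all(
--                     lo <= x_min and x_max <= hi for (y, (lo, hi)) in rows[lo_i:hi_i]):
--                 best = max(best, (x_max - x_min + 1) * (y_max - y_min + 1))
--     return best
-- ===== Notes on version B (the rewrite author's own statement) =====
-- stated objective: alternative
-- what changed: B sorts the covered rows once and, for each unordered corner pair (suffix loop), binary-searches the block of rows inside the pair's y-span, declaring the pair fully covered iff that block is as long as the span and each of its rows covers the pair's x-range - instead of A's probe of the dict at every integer y of the rectangle for every ordered pair.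
import Mathlib
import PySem

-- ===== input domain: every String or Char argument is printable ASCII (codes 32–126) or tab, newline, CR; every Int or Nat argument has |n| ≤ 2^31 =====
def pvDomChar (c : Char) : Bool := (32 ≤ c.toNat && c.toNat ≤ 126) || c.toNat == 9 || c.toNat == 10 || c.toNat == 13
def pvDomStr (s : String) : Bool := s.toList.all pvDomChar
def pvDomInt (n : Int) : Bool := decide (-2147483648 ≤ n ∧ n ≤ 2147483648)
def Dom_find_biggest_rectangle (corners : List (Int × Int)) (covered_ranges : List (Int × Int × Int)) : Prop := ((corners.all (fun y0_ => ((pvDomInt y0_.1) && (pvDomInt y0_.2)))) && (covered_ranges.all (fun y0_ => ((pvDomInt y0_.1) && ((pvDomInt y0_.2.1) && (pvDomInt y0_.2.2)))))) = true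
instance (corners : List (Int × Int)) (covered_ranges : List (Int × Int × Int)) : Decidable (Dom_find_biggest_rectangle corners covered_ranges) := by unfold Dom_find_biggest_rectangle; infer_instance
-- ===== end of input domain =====

-- B sorts the covered rows once and, per unordered corner pair, binary-searches the row block inside the pair's y-span instead of A's probe of the dict at every integer y of every ordered pair (objective: alternative).

-- ===== PORT A =====
def pvSizeBetween (a b : Int × Int) : Int :=
  (|a.1 - b.1| + 1) * (|a.2 - b.2| + 1)

-- 'for y in range(rect_y_min, rect_y_max)' with its early returns, as a counting recursion
-- (the range is consumed lazily, exactly as Python's range iterator)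
def pvIsFullGo (d : PySem.Dict Int (Int × Int)) (xmin xmax y ymax : Int) : Bool :=
  if _h : y < ymax then
    match d.get? y with
    | none => false
    | some (lo, hi) => if lo > xmin ∨ hi < xmax then false else pvIsFullGo d xmin xmax (y + 1) ymax
  else true
termination_by (ymax - y).toNat
decreasing_by omega

def pvIsFull (a b : Int × Int) (d : PySem.Dict Int (Int × Int)) : Bool :=
  pvIsFullGo d (min a.1 b.1) (max a.1 b.1) (min a.2 b.2) (max a.2 b.2)

def find_biggest_rectangle (corners : List (Int × Int)) (covered_ranges : List (Int × Int × Int)) : Int :=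
  corners.foldl (fun result a =>
    corners.foldl (fun result b =>
      if a == b then result
      else if !(pvIsFull a b (PySem.Dict.mk covered_ranges)) then result
      else max result (pvSizeBetween a b)) result) 0

-- ===== PORT B =====
-- the 'left_pos' binary search of Source B; ys[mid] is provably in range (0 ≤ lo ≤ mid < hi ≤ len),
-- so the Python indexing cannot raise and pyGetD's default is never read
def pvLeftPos (ys : List Int) (x lo hi : Int) : Int :=
  if _h : lo < hi then
    let mid := PySem.Int.floordiv (lo + hi) 2
    if PySem.List.pyGetD ys mid 0 < x then pvLeftPos ys x (mid + 1) hi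
    else pvLeftPos ys x lo mid
  else lo
termination_by (hi - lo).toNat
decreasing_by
  · have h1 : lo ≤ PySem.Int.floordiv (lo + hi) 2 :=
      (PySem.Int.le_floordiv_iff_mul_le (by omega)).2 (by omega)
    omega
  · have h2 : PySem.Int.floordiv (lo + hi) 2 < hi :=
      (PySem.Int.floordiv_lt_iff_lt_mul (by omega)).2 (by omega)
    omega

def pvCoversX (xmin xmax : Int) (t : Int × Int × Int) : Bool :=
  t.2.1 ≤ xmin && xmax ≤ t.2.2

def pvPairBest (rows : List (Int × Int × Int)) (ys : List Int) (a b : Int × Int) (best : Int) : Int :=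
  if a == b then best
  else
    let xmin := min a.1 b.1
    let xmax := max a.1 b.1
    let ymin := min a.2 b.2
    let ymax := max a.2 b.2
    let loi := pvLeftPos ys ymin 0 (ys.length : Int)
    let hii := pvLeftPos ys ymax 0 (ys.length : Int)
    if hii - loi = ymax - ymin ∧ (PySem.List.slice rows (some loi) (some hii)).all (pvCoversX xmin xmax) then
      max best ((xmax - xmin + 1) * (ymax - ymin + 1))
    else best

def pvTriLoop (rows : List (Int × Int × Int)) (ys : List Int) : List (Int × Int) → Int → Int
  | [], best => best
  | a :: rest, best => pvTriLoop rows ys rest (rest.foldl (fun best b => pvPairBest rows ys a b best) best)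

def find_biggest_rectangle_alt (corners : List (Int × Int)) (covered_ranges : List (Int × Int × Int)) : Int :=
  let rows := PySem.List.sorted covered_ranges (fun t => t.1) false
  let ys := rows.map (fun t => t.1)
  pvTriLoop rows ys corners 0

-- ===== PRECONDITION & SPEC =====
-- Pre_ excludes association lists with duplicate keys: covered_ranges is a Python dict, whose keys are
-- always distinct, so a duplicate-key list does not represent any input the Python programs can receive.
def Pre_find_biggest_rectangle (corners : List (Int × Int)) (covered_ranges : List (Int × Int × Int)) : Prop :=
  (covered_ranges.map (·.1)).Nodup
instance (corners : List (Int × Int)) (covered_ranges : List (Int × Int × Int)) : Decidable (Pre_find_biggest_rectangle corners covered_ranges) := by unfold Pre_find_biggest_rectangle; infer_instance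

def pvWitness_find_biggest_rectangle : (List (Int × Int)) × (List (Int × Int × Int)) :=
  ([(0, 0), (2, 1)], [(0, (0, 5)), (1, (0, 5))])

def Spec_find_biggest_rectangle (corners : List (Int × Int)) (covered_ranges : List (Int × Int × Int)) (out : Int) : Prop := out = find_biggest_rectangle_alt corners covered_ranges
instance (corners : List (Int × Int)) (covered_ranges : List (Int × Int × Int)) (out : Int) : Decidable (Spec_find_biggest_rectangle corners covered_ranges out) := by unfold Spec_find_biggest_rectangle; infer_instance

-- ===== CLAIM (what is proved, stated in full; the proofs are below) =====
def Claim_equal_find_biggest_rectangle : Prop := ∀ (corners : List (Int × Int)) (covered_ranges : List (Int × Int × Int)), Dom_find_biggest_rectangle corners covered_ranges → Pre_find_biggest_rectangle corners covered_ranges → Spec_find_biggest_rectangle corners covered_ranges (find_biggest_rectangle corners covered_ranges)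


-- ===== LEMMAS AND PROOFS =====

-- the shared pair condition both programs test (a ≠ b and the rectangle fully covered)
def pvC (covered : List (Int × Int × Int)) (a b : Int × Int) : Bool :=
  !(a == b) && pvIsFull a b (PySem.Dict.mk covered)

-- the triangle contribution list B's recursion folds max over
def pvTri (covered : List (Int × Int × Int)) : List (Int × Int) → List Int
  | [] => []
  | a :: rest => ((rest.filter (pvC covered a)).map (pvSizeBetween a)) ++ pvTri covered rest

-- the row predicate the proofs count with (a row inside the y-span covering the x-range)
def pvGoodRow (xmin xmax ymin ymax : Int) (t : Int × Int × Int) : Bool :=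
  ymin ≤ t.1 && t.1 < ymax && t.2.1 ≤ xmin && xmax ≤ t.2.2

-- the per-row coverage test A's loop applies
def pvCover (d : PySem.Dict Int (Int × Int)) (xmin xmax : Int) (y : Int) : Bool :=
  match d.get? y with
  | none => false
  | some (lo, hi) => !(decide (lo > xmin) || decide (hi < xmax))

-- generic: an "if c then max" loop is a foldl max over filter+map
theorem pv_foldl_if_max {α : Type} (c : α → Bool) (v : α → Int) :
    ∀ (l : List α) (r : Int),
      l.foldl (fun r b => if c b then max r (v b) else r) r
        = ((l.filter c).map v).foldl max r := by
  intro l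
  induction l with
  | nil => intro r; rfl
  | cons x xs ih =>
    intro r
    by_cases h : c x = true <;> simp [h, ih]

-- generic: nested max loops flatten
theorem pv_foldl_flat {α : Type} (h : α → List Int) :
    ∀ (l : List α) (r : Int),
      l.foldl (fun r a => (h a).foldl max r) r = (l.flatMap h).foldl max r := by
  intro l
  induction l with
  | nil => intro r; rfl
  | cons x xs ih => intro r; simp [List.flatMap_cons, List.foldl_append, ih]

-- a max-fold from 0 depends only on membership
theorem pv_foldl_max_mem_eq (l₁ l₂ : List Int) (h : ∀ x, x ∈ l₁ ↔ x ∈ l₂) :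
    l₁.foldl max 0 = l₂.foldl max 0 := by
  apply le_antisymm
  · rcases PySem.List.foldl_max_mem l₁ 0 with h1 | h1
    · rw [h1]; exact (PySem.List.le_foldl_max l₂ 0).1
    · exact (PySem.List.le_foldl_max l₂ 0).2 _ ((h _).1 h1)
  · rcases PySem.List.foldl_max_mem l₂ 0 with h1 | h1
    · rw [h1]; exact (PySem.List.le_foldl_max l₁ 0).1
    · exact (PySem.List.le_foldl_max l₁ 0).2 _ ((h _).2 h1)

-- symmetry of the value and of the condition
theorem pvSizeBetween_symm (a b : Int × Int) : pvSizeBetween a b = pvSizeBetween b a := by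
  simp [pvSizeBetween, abs_sub_comm]

theorem pvC_symm (covered : List (Int × Int × Int)) (a b : Int × Int) :
    pvC covered a b = pvC covered b a := by
  unfold pvC pvIsFull
  rw [min_comm a.1, max_comm a.1, min_comm a.2, max_comm a.2]
  congr 1
  simp [BEq.comm]

-- A's loop over the row range is an `all` of the per-row test
theorem pvIsFullGo_eq_all (d : PySem.Dict Int (Int × Int)) (xmin xmax : Int) :
    ∀ (y ymax : Int), pvIsFullGo d xmin xmax y ymax
      = (PySem.List.pyRange y ymax 1).all (pvCover d xmin xmax) := by
  intro y ymax
  fun_induction pvIsFullGo d xmin xmax y ymax with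
  | case1 y h hnone =>
    rw [PySem.List.pyRange_one_cons h]
    simp [pvCover, hnone]
  | case2 y h lo hi hget h1 =>
    rw [PySem.List.pyRange_one_cons h]
    simp only [List.all_cons, pvCover, hget, Bool.false_eq]
    rcases h1 with h1 | h1 <;> simp [h1]
  | case3 y h lo hi hget h1 ih =>
    rw [PySem.List.pyRange_one_cons h, List.all_cons, ih]
    rw [not_or, not_lt, not_lt] at h1
    simp [pvCover, hget, not_lt.mpr h1.1, not_lt.mpr h1.2]
  | case4 y h =>
    rw [PySem.List.pyRange_one_eq_nil (by omega)]
    rfl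

-- counting covering items equals the rectangle's row span iff every row of the range is covered
theorem pv_count_core (covered : List (Int × Int × Int)) (xmin xmax ymin ymax : Int)
    (hk : (covered.map (·.1)).Nodup) (hy : ymin ≤ ymax) :
    ((covered.countP (pvGoodRow xmin xmax ymin ymax) : Int) = ymax - ymin)
      ↔ ∀ y ∈ PySem.List.pyRange ymin ymax 1, pvCover (PySem.Dict.mk covered) xmin xmax y = true := by
  set d := PySem.Dict.mk covered with hd
  set p := pvGoodRow xmin xmax ymin ymax with hp
  set R := PySem.List.pyRange ymin ymax 1 with hR
  have hmemchar : ∀ y : Int, (∃ t ∈ covered, p t = true ∧ t.1 = y)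
      ↔ (y ∈ R ∧ pvCover d xmin xmax y = true) := by
    intro y
    constructor
    · rintro ⟨⟨y', lo, hi⟩, ht, hpt, rfl⟩
      simp only [hp, pvGoodRow, Bool.and_eq_true, decide_eq_true_eq] at hpt
      obtain ⟨⟨⟨h1, h2⟩, h3⟩, h4⟩ := hpt
      have hget : d.get? y' = some (lo, hi) :=
        (PySem.Dict.get?_eq_some_iff_mem_items d y' (lo, hi) hk).2 ht
      refine ⟨?_, ?_⟩
      · rw [hR]; exact (PySem.List.mem_pyRange_one).2 ⟨h1, h2⟩
      · simp [pvCover, hget]; omega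
    · rintro ⟨hyR, hcov⟩
      rw [hR, PySem.List.mem_pyRange_one] at hyR
      simp only [pvCover] at hcov
      cases hget : d.get? y with
      | none => rw [hget] at hcov; simp at hcov
      | some v =>
        obtain ⟨lo, hi⟩ := v
        rw [hget] at hcov
        simp only [Bool.not_eq_true', Bool.or_eq_false_iff, decide_eq_false_iff_not, not_lt] at hcov
        refine ⟨(y, lo, hi), (PySem.Dict.get?_eq_some_iff_mem_items d y (lo, hi) hk).1 hget, ?_, rfl⟩
        simp [hp, pvGoodRow]
        exact ⟨⟨⟨hyR.1, hyR.2⟩, hcov.1⟩, hcov.2⟩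
  have hKnodup : ((covered.filter p).map (·.1)).Nodup := by
    exact hk.sublist ((List.filter_sublist (p := p) (l := covered)).map _)
  have hFnodup : (R.filter (pvCover d xmin xmax)).Nodup := by
    exact (PySem.List.nodup_pyRange_one ymin ymax).filter _
  have hperm : ((covered.filter p).map (·.1)).Perm (R.filter (pvCover d xmin xmax)) := by
    apply List.perm_of_nodup_nodup_toFinset_eq hKnodup hFnodup
    ext y
    simp only [List.mem_toFinset, List.mem_map, List.mem_filter]
    constructor
    · rintro ⟨t, ⟨ht, hpt⟩, rfl⟩
      exact (hmemchar t.1).1 ⟨t, ht, hpt, rfl⟩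
    · rintro ⟨hyR, hcov⟩
      obtain ⟨t, ht, hpt, hty⟩ := (hmemchar y).2 ⟨hyR, hcov⟩
      exact ⟨t, ⟨ht, hpt⟩, hty⟩
  have hlen : covered.countP p = (R.filter (pvCover d xmin xmax)).length := by
    rw [List.countP_eq_length_filter, ← hperm.length_eq, List.length_map]
  have hRlen : R.length = (ymax - ymin).toNat := PySem.List.length_pyRange_one ymin ymax
  rw [hlen, ← List.length_filter_eq_length_iff (l := R)]
  have hfle : (R.filter (pvCover d xmin xmax)).length ≤ R.length :=
    List.length_filter_le _ _
  omega

-- the binary search meets its bisect_left contract on a sorted list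
theorem pvLeftPos_spec (ys : List Int) (x : Int) (hs : ys.Pairwise (· ≤ ·)) :
    ∀ (n : Nat) (lo hi : Int), (hi - lo).toNat = n → 0 ≤ lo → lo ≤ hi → hi ≤ (ys.length : Int) →
      (∀ j : Nat, (hj : j < ys.length) → (j : Int) < lo → ys[j] < x) →
      (∀ j : Nat, (hj : j < ys.length) → hi ≤ (j : Int) → x ≤ ys[j]) →
      lo ≤ pvLeftPos ys x lo hi ∧ pvLeftPos ys x lo hi ≤ hi ∧
      (∀ j : Nat, (hj : j < ys.length) → (j : Int) < pvLeftPos ys x lo hi → ys[j] < x) ∧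
      (∀ j : Nat, (hj : j < ys.length) → pvLeftPos ys x lo hi ≤ (j : Int) → x ≤ ys[j]) := by
  have hpw := List.pairwise_iff_getElem.1 hs
  intro n
  induction n using Nat.strong_induction_on with
  | _ n ih =>
    intro lo hi hn h0 hlh hhl hb ha
    rw [pvLeftPos]
    by_cases h : lo < hi
    · rw [dif_pos h]
      have h1 : lo ≤ PySem.Int.floordiv (lo + hi) 2 :=
        (PySem.Int.le_floordiv_iff_mul_le (by omega)).2 (by omega)
      have h2 : PySem.Int.floordiv (lo + hi) 2 < hi :=
        (PySem.Int.floordiv_lt_iff_lt_mul (by omega)).2 (by omega)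
      set mid := PySem.Int.floordiv (lo + hi) 2 with hmid
      have hmlt : mid.toNat < ys.length := by omega
      have hget : PySem.List.pyGetD ys mid 0 = ys[mid.toNat] :=
        PySem.List.pyGetD_eq_getElem ys 0 (by omega) (by omega)
      by_cases hc : PySem.List.pyGetD ys mid 0 < x
      · rw [if_pos hc]
        refine (ih ((hi - (mid + 1)).toNat) (by omega) (mid + 1) hi (by omega) (by omega)
          (by omega) hhl ?_ ha).imp (by omega) (fun h => h)
        intro j hj hjm
        rcases Nat.lt_or_ge j mid.toNat with hlt | hge
        · calc ys[j] ≤ ys[mid.toNat] := hpw j mid.toNat hj hmlt hlt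
            _ < x := hget ▸ hc
        · have : j = mid.toNat := by omega
          subst this
          exact hget ▸ hc
      · rw [if_neg hc]
        rw [not_lt] at hc
        refine (ih ((mid - lo).toNat) (by omega) lo mid (by omega) h0 (by omega) (by omega)
          hb ?_).imp (fun h => h) (fun h => ⟨by omega, h.2⟩)
        intro j hj hjm
        rcases Nat.lt_or_ge mid.toNat j with hlt | hge
        · calc x ≤ ys[mid.toNat] := hget ▸ hc
            _ ≤ ys[j] := hpw mid.toNat j hmlt hj hlt
        · have : j = mid.toNat := by omega
          subst this
          exact hget ▸ hc
    · rw [dif_neg h]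
      exact ⟨le_refl _, by omega, fun j hj hjl => hb j hj hjl, fun j hj hjl => ha j hj (by omega)⟩

-- a duplicate-free list included in another duplicate-free list is no longer
theorem pv_nodup_length_le (l r : List Int) (h : l.Nodup) (hr : r.Nodup) (hsub : l ⊆ r) :
    l.length ≤ r.length := by
  rw [← List.toFinset_card_of_nodup h, ← List.toFinset_card_of_nodup hr]
  exact Finset.card_le_card (fun x hx => List.mem_toFinset.2 (hsub (List.mem_toFinset.1 hx)))

-- B's span test on the sorted rows counts exactly the covering rows of the whole dict
theorem pv_slice_iff (covered : List (Int × Int × Int)) (hk : (covered.map (·.1)).Nodup)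
    (xmin xmax ymin ymax : Int) (hy : ymin ≤ ymax) :
    (pvLeftPos ((PySem.List.sorted covered (fun t => t.1) false).map (fun t => t.1)) ymax 0
        (((PySem.List.sorted covered (fun t => t.1) false).map (fun t => t.1)).length : Int)
      - pvLeftPos ((PySem.List.sorted covered (fun t => t.1) false).map (fun t => t.1)) ymin 0
        (((PySem.List.sorted covered (fun t => t.1) false).map (fun t => t.1)).length : Int) = ymax - ymin
     ∧ (PySem.List.slice (PySem.List.sorted covered (fun t => t.1) false)
          (some (pvLeftPos ((PySem.List.sorted covered (fun t => t.1) false).map (fun t => t.1)) ymin 0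
            (((PySem.List.sorted covered (fun t => t.1) false).map (fun t => t.1)).length : Int)))
          (some (pvLeftPos ((PySem.List.sorted covered (fun t => t.1) false).map (fun t => t.1)) ymax 0
            (((PySem.List.sorted covered (fun t => t.1) false).map (fun t => t.1)).length : Int)))).all
          (pvCoversX xmin xmax) = true)
    ↔ ((covered.countP (pvGoodRow xmin xmax ymin ymax) : Int) = ymax - ymin) := by
  set rows := PySem.List.sorted covered (fun t => t.1) false with hrows
  set ys := rows.map (fun t => t.1) with hys
  have hperm : rows.Perm covered := PySem.List.sorted_perm covered (fun t => t.1) false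
  have hynd : ys.Nodup := ((hperm.map (fun t => t.1)).nodup_iff).2 hk
  have hpw : ys.Pairwise (· ≤ ·) := PySem.List.sorted_map_key_pairwise covered (fun t => t.1)
  have hLrows : ys.length = rows.length := by rw [hys, List.length_map]
  have hvac1 : ∀ j : Nat, (hj : j < ys.length) → (j : Int) < 0 → ys[j] < ymin :=
    fun j hj hlt => absurd hlt (by omega)
  have hvac1' : ∀ j : Nat, (hj : j < ys.length) → (j : Int) < 0 → ys[j] < ymax :=
    fun j hj hlt => absurd hlt (by omega)
  have hvac2 : ∀ j : Nat, (hj : j < ys.length) → ((ys.length : Int)) ≤ (j : Int) → ymin ≤ ys[j] :=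
    fun j hj hge => absurd hge (by exact_mod_cast not_le.2 hj)
  have hvac2' : ∀ j : Nat, (hj : j < ys.length) → ((ys.length : Int)) ≤ (j : Int) → ymax ≤ ys[j] :=
    fun j hj hge => absurd hge (by exact_mod_cast not_le.2 hj)
  obtain ⟨hi0l, hi0u, hbelow1, habove1⟩ :=
    pvLeftPos_spec ys ymin hpw (((ys.length : Int) - 0).toNat) 0 (ys.length : Int) rfl
      (le_refl 0) (by omega) (le_refl _) hvac1 hvac2
  obtain ⟨hj0l, hj0u, hbelow2, habove2⟩ :=
    pvLeftPos_spec ys ymax hpw (((ys.length : Int) - 0).toNat) 0 (ys.length : Int) rfl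
      (le_refl 0) (by omega) (le_refl _) hvac1' hvac2'
  set i0 := pvLeftPos ys ymin 0 (ys.length : Int) with hi0
  set j0 := pvLeftPos ys ymax 0 (ys.length : Int) with hj0
  have hij : i0 ≤ j0 := by
    by_contra hcon
    rw [not_le] at hcon
    have hjn : j0.toNat < ys.length := by omega
    have h1 : ys[j0.toNat] < ymin := hbelow1 j0.toNat hjn (by omega)
    have h2 : ymax ≤ ys[j0.toNat] := habove2 j0.toNat hjn (by omega)
    omega
  set i0t := i0.toNat with hi0t
  set j0t := j0.toNat with hj0t
  have hcasti : ((i0t : Nat) : Int) = i0 := Int.toNat_of_nonneg (by omega)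
  have hcastj : ((j0t : Nat) : Int) = j0 := Int.toNat_of_nonneg (by omega)
  have hj0len : j0t ≤ rows.length := by omega
  have hi0j0 : i0t ≤ j0t := by omega
  have hslice : PySem.List.slice rows (some i0) (some j0) = (rows.drop i0t).take (j0t - i0t) := by
    rw [← hcasti, ← hcastj, PySem.List.slice_natCast]
  set S := (rows.drop i0t).take (j0t - i0t) with hS
  have hSlen : S.length = j0t - i0t := by
    rw [hS, List.length_take, List.length_drop]
    omega
  have hfst : ∀ (k : Nat) (hk2 : k < rows.length), rows[k].1 = ys[k]'(by omega) := by
    intro k hk2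
    simp [hys]
  have htake0 : (rows.take i0t).countP (pvGoodRow xmin xmax ymin ymax) = 0 := by
    rw [List.countP_eq_zero]
    intro t ht
    obtain ⟨j, hj, rfl⟩ := List.mem_iff_getElem.1 ht
    have hjlen : j < rows.length := by
      rw [List.length_take] at hj
      omega
    have hjlt : (j : Int) < i0 := by
      rw [List.length_take] at hj
      omega
    have hylt : ys[j]'(by omega) < ymin := hbelow1 j (by omega) hjlt
    have hrj : rows[j].1 = ys[j]'(by omega) := hfst j hjlen
    rw [List.getElem_take]
    simp only [pvGoodRow, Bool.and_eq_true, decide_eq_true_eq]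
    rintro ⟨⟨⟨hge, _⟩, _⟩, _⟩
    omega
  have hdrop0 : (rows.drop j0t).countP (pvGoodRow xmin xmax ymin ymax) = 0 := by
    rw [List.countP_eq_zero]
    intro t ht
    obtain ⟨j, hj, rfl⟩ := List.mem_iff_getElem.1 ht
    have hjlen : j0t + j < rows.length := by
      rw [List.length_drop] at hj
      omega
    have hyge : ymax ≤ ys[j0t + j]'(by omega) := habove2 (j0t + j) (by omega) (by omega)
    have hrj : rows[j0t + j].1 = ys[j0t + j]'(by omega) := hfst (j0t + j) hjlen
    rw [List.getElem_drop]
    simp only [pvGoodRow, Bool.and_eq_true, decide_eq_true_eq]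
    rintro ⟨⟨⟨_, hlt⟩, _⟩, _⟩
    omega
  have hScong : S.countP (pvGoodRow xmin xmax ymin ymax) = S.countP (pvCoversX xmin xmax) := by
    apply List.countP_congr
    intro t ht
    obtain ⟨j, hj, rfl⟩ := List.mem_iff_getElem.1 ht
    have hjS : j < j0t - i0t := by omega
    have hjlen : i0t + j < rows.length := by omega
    have hSj : S[j] = rows[i0t + j]'(by omega) := by
      simp [hS, List.getElem_take, List.getElem_drop]
    have hylo : ymin ≤ ys[i0t + j]'(by omega) := habove1 (i0t + j) (by omega) (by omega)
    have hyhi : ys[i0t + j]'(by omega) < ymax := hbelow2 (i0t + j) (by omega) (by omega)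
    have hrj : (rows[i0t + j]'(by omega)).1 = ys[i0t + j]'(by omega) := hfst (i0t + j) hjlen
    rw [hSj]
    simp only [pvGoodRow, pvCoversX, Bool.and_eq_true, decide_eq_true_eq]
    constructor
    · rintro ⟨⟨⟨_, _⟩, h3⟩, h4⟩
      exact ⟨h3, h4⟩
    · rintro ⟨h3, h4⟩
      exact ⟨⟨⟨by omega, by omega⟩, h3⟩, h4⟩
  have hcov : covered.countP (pvGoodRow xmin xmax ymin ymax) = S.countP (pvCoversX xmin xmax) := by
    have hds : rows.drop i0t = S ++ rows.drop j0t := by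
      conv_lhs => rw [← List.take_append_drop (j0t - i0t) (rows.drop i0t)]
      rw [List.drop_drop]
      congr 2
      omega
    have : rows.countP (pvGoodRow xmin xmax ymin ymax) = S.countP (pvCoversX xmin xmax) := by
      conv_lhs => rw [← List.take_append_drop i0t rows]
      rw [List.countP_append, hds, List.countP_append, htake0, hdrop0, hScong]
      omega
    rw [← this]
    exact (hperm.countP_eq _).symm
  have hTub : S.length ≤ (ymax - ymin).toNat := by
    have hsubl : (S.map (fun t => t.1)).Sublist ys := by
      have h1 : S.map (fun t => t.1) = ((rows.map (fun t => t.1)).drop i0t).take (j0t - i0t) := by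
        rw [hS, List.map_take, List.map_drop]
      rw [h1, ← hys]
      exact (List.take_sublist _ _).trans (List.drop_sublist _ _)
    have hTnd : (S.map (fun t => t.1)).Nodup := hynd.sublist hsubl
    have hsubR : (S.map (fun t => t.1)) ⊆ PySem.List.pyRange ymin ymax 1 := by
      intro y hy2
      obtain ⟨t, ht, rfl⟩ := List.mem_map.1 hy2
      obtain ⟨j, hj, rfl⟩ := List.mem_iff_getElem.1 ht
      have hjlen : i0t + j < rows.length := by omega
      have hSj : S[j] = rows[i0t + j]'(by omega) := by
        simp [hS, List.getElem_take, List.getElem_drop]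
      have hylo : ymin ≤ ys[i0t + j]'(by omega) := habove1 (i0t + j) (by omega) (by omega)
      have hyhi : ys[i0t + j]'(by omega) < ymax := hbelow2 (i0t + j) (by omega) (by omega)
      have hrj : (rows[i0t + j]'(by omega)).1 = ys[i0t + j]'(by omega) := hfst (i0t + j) hjlen
      rw [hSj, PySem.List.mem_pyRange_one]
      omega
    calc S.length = (S.map (fun t => t.1)).length := (List.length_map _).symm
      _ ≤ (PySem.List.pyRange ymin ymax 1).length :=
          pv_nodup_length_le _ _ hTnd (PySem.List.nodup_pyRange_one ymin ymax) hsubR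
      _ = (ymax - ymin).toNat := PySem.List.length_pyRange_one ymin ymax
  rw [hslice]
  constructor
  · rintro ⟨hlen, hall⟩
    have hcl : S.countP (pvCoversX xmin xmax) = S.length :=
      List.countP_eq_length.2 (fun t ht => List.all_eq_true.1 hall t ht)
    rw [hcov, hcl]
    omega
  · intro hc
    rw [hcov] at hc
    have h1 : S.countP (pvCoversX xmin xmax) ≤ S.length := List.countP_le_length
    constructor
    · omega
    · have hcl : S.countP (pvCoversX xmin xmax) = S.length := by omega
      rw [List.all_eq_true]
      exact List.countP_eq_length.1 hcl

-- B's pair step, under distinct keys, is A's pair condition and value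
theorem pvPairBest_eq (covered : List (Int × Int × Int)) (hk : (covered.map (·.1)).Nodup)
    (a b : Int × Int) (best : Int) :
    pvPairBest (PySem.List.sorted covered (fun t => t.1) false)
      ((PySem.List.sorted covered (fun t => t.1) false).map (fun t => t.1)) a b best
      = if pvC covered a b then max best (pvSizeBetween a b) else best := by
  unfold pvPairBest
  by_cases hab : (a == b) = true
  · simp [pvC, hab]
  · rw [if_neg (by simp [hab])]
    show (if pvLeftPos _ (max a.2 b.2) 0 _ - pvLeftPos _ (min a.2 b.2) 0 _ = max a.2 b.2 - min a.2 b.2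
            ∧ (PySem.List.slice _ _ _).all (pvCoversX (min a.1 b.1) (max a.1 b.1)) = true
      then max best ((max a.1 b.1 - min a.1 b.1 + 1) * (max a.2 b.2 - min a.2 b.2 + 1))
      else best) = _
    have hcore := pv_count_core covered (min a.1 b.1) (max a.1 b.1) (min a.2 b.2) (max a.2 b.2)
      hk min_le_max
    have hfull : pvIsFull a b (PySem.Dict.mk covered)
        = (PySem.List.pyRange (min a.2 b.2) (max a.2 b.2) 1).all
            (pvCover (PySem.Dict.mk covered) (min a.1 b.1) (max a.1 b.1)) :=
      pvIsFullGo_eq_all _ _ _ _ _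
    have hC : pvC covered a b = pvIsFull a b (PySem.Dict.mk covered) := by
      simp [pvC, hab]
    have hlast : (∀ y ∈ PySem.List.pyRange (min a.2 b.2) (max a.2 b.2) 1,
        pvCover (PySem.Dict.mk covered) (min a.1 b.1) (max a.1 b.1) y = true)
        ↔ pvC covered a b = true := by
      rw [hC, hfull, List.all_eq_true]
    have hiff := (pv_slice_iff covered hk (min a.1 b.1) (max a.1 b.1) (min a.2 b.2) (max a.2 b.2)
      min_le_max).trans (hcore.trans hlast)
    rw [if_congr hiff rfl rfl]
    have hvx : max a.1 b.1 - min a.1 b.1 = |a.1 - b.1| :=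
      (max_sub_min_eq_abs a.1 b.1).trans (abs_sub_comm b.1 a.1)
    have hvy : max a.2 b.2 - min a.2 b.2 = |a.2 - b.2| :=
      (max_sub_min_eq_abs a.2 b.2).trans (abs_sub_comm b.2 a.2)
    have hval : (max a.1 b.1 - min a.1 b.1 + 1) * (max a.2 b.2 - min a.2 b.2 + 1)
        = pvSizeBetween a b := by rw [hvx, hvy]; rfl
    rw [hval]

-- B's recursion is the max-fold of the triangle list
theorem pvTriLoop_eq (covered : List (Int × Int × Int)) (hk : (covered.map (·.1)).Nodup) :
    ∀ (l : List (Int × Int)) (best : Int),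
      pvTriLoop (PySem.List.sorted covered (fun t => t.1) false)
        ((PySem.List.sorted covered (fun t => t.1) false).map (fun t => t.1)) l best
        = (pvTri covered l).foldl max best := by
  intro l
  induction l with
  | nil => intro best; rfl
  | cons a rest ih =>
    intro best
    show pvTriLoop _ _ rest _ = _
    rw [ih]
    simp only [pvTri, List.foldl_append]
    congr 1
    rw [← pv_foldl_if_max (pvC covered a) (pvSizeBetween a) rest best]
    apply PySem.List.foldl_congr_mem
    intro acc b _
    exact pvPairBest_eq covered hk a b acc

-- every triangle contribution comes from a pair of list members
theorem pvTri_sub (covered : List (Int × Int × Int)) :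
    ∀ (l : List (Int × Int)) (x : Int), x ∈ pvTri covered l →
      ∃ a ∈ l, ∃ b ∈ l, pvC covered a b = true ∧ x = pvSizeBetween a b := by
  intro l
  induction l with
  | nil => intro x hx; simp [pvTri] at hx
  | cons c t ih =>
    intro x hx
    simp only [pvTri, List.mem_append, List.mem_map, List.mem_filter] at hx
    rcases hx with ⟨b, ⟨hb, hcb⟩, rfl⟩ | hx
    · exact ⟨c, List.mem_cons_self, b, List.mem_cons_of_mem _ hb, hcb, rfl⟩
    · obtain ⟨a, ha, b, hb, hcb, hv⟩ := ih x hx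
      exact ⟨a, List.mem_cons_of_mem _ ha, b, List.mem_cons_of_mem _ hb, hcb, hv⟩

-- every admissible pair of list members contributes to the triangle list
theorem pvTri_mem (covered : List (Int × Int × Int)) :
    ∀ (l : List (Int × Int)) (a b : Int × Int), a ∈ l → b ∈ l →
      pvC covered a b = true → pvSizeBetween a b ∈ pvTri covered l := by
  intro l
  induction l with
  | nil => intro a b ha; simp at ha
  | cons c t ih =>
    intro a b ha hb hcab
    have hne : a ≠ b := by
      intro h
      rw [pvC, h] at hcab
      simp at hcab
    simp only [pvTri, List.mem_append]
    rcases List.mem_cons.1 ha with rfl | hat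
    · left
      have hbt : b ∈ t := by
        rcases List.mem_cons.1 hb with rfl | h
        · exact absurd rfl hne
        · exact h
      simp only [List.mem_map, List.mem_filter]
      exact ⟨b, ⟨hbt, hcab⟩, rfl⟩
    · rcases List.mem_cons.1 hb with rfl | hbt
      · left
        simp only [List.mem_map, List.mem_filter]
        exact ⟨a, ⟨hat, (pvC_symm covered a b) ▸ hcab⟩, pvSizeBetween_symm b a⟩
      · right
        exact ih a b hat hbt hcab

-- A is the max-fold over the full ordered-pair contribution list
theorem pvA_eq (corners : List (Int × Int)) (covered : List (Int × Int × Int)) :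
    find_biggest_rectangle corners covered
      = (corners.flatMap (fun a => ((corners.filter (pvC covered a)).map (pvSizeBetween a)))).foldl max 0 := by
  unfold find_biggest_rectangle
  rw [← pv_foldl_flat (fun a => (corners.filter (pvC covered a)).map (pvSizeBetween a)) corners 0]
  apply PySem.List.foldl_congr_mem
  intro r a _
  rw [← pv_foldl_if_max (pvC covered a) (pvSizeBetween a) corners r]
  apply PySem.List.foldl_congr_mem
  intro acc b _
  by_cases hab : (a == b) = true
  · simp [hab, pvC]
  · by_cases hf : pvIsFull a b (PySem.Dict.mk covered) = true
    · simp [hab, hf, pvC]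
    · simp [hab, hf, pvC]

-- ===== VERDICT (by name: the statement is the Claim_ definition above) =====
theorem find_biggest_rectangle_spec : Claim_equal_find_biggest_rectangle := by
  intro corners covered _hdom hk
  unfold Spec_find_biggest_rectangle
  rw [pvA_eq]
  have haltB : find_biggest_rectangle_alt corners covered = (pvTri covered corners).foldl max 0 := by
    show pvTriLoop (PySem.List.sorted covered (fun t => t.1) false)
      ((PySem.List.sorted covered (fun t => t.1) false).map (fun t => t.1)) corners 0 = _
    exact pvTriLoop_eq covered hk corners 0
  rw [haltB]
  apply pv_foldl_max_mem_eq
  intro x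
  constructor
  · intro hx
    simp only [List.mem_flatMap, List.mem_map, List.mem_filter] at hx
    obtain ⟨a, ha, b, ⟨hb, hc⟩, hv⟩ := hx
    exact hv ▸ pvTri_mem covered corners a b ha hb hc
  · intro hx
    obtain ⟨a, ha, b, hb, hc, hv⟩ := pvTri_sub covered corners x hx
    simp only [List.mem_flatMap, List.mem_map, List.mem_filter]
    exact ⟨a, ha, b, ⟨hb, hc⟩, hv.symm⟩
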